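-- pv_equiv track=rewrite | github.com/nydiokar/MAX | MAX/agents/supervisor_agent.py | _analyze_parallel_components
-- ===== SOURCE A (Python) =====
-- from typing import TYPE_CHECKING, Optional, Any, AsyncIterable, Union, Dict, List
--
-- def _analyze_parallel_components(task_description: str) -> List[str]:
--     """Identify independent components that can be executed in parallel."""
--     components = []
--     current_component = []
--
--     for line in task_description.split('\n'):
--         if any(marker in line.lower() for marker in ['independent', 'parallel', 'concurrent']):
--             if current_component:
--                 components.append('\n'.join(current_component))
--                 current_component = []
--         current_component.append(line)
--
--     if current_component:
--         components.append('\n'.join(current_component))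
--
--     return components if components else [task_description]
-- ===== SOURCE B (Python) =====
-- MARKERS = ('independent', 'parallel', 'concurrent')
--
--
-- def _is_marker(line):
--     low = line.lower()
--     return any(m in low for m in MARKERS)
--
--
-- def _components(lines):
--     """Split a line list into components: each component starts at the list
--     head and extends until the next marker line, which begins the next one."""
--     if not lines:
--         return []
--     body = [lines[0]]
--     rest = lines[1:]
--     while rest and not _is_marker(rest[0]):
--         body.append(rest[0])
--         rest = rest[1:]
--     return ['\n'.join(body)] + _components(rest)
--
--
-- def _analyze_parallel_components(task_description: str):
--     """Identify independent components that can be executed in parallel."""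
--     components = _components(task_description.split('\n'))
--     return components or [task_description]
-- ===== Notes on version B (the rewrite author's own statement) =====
-- stated objective: alternative
-- what changed: Replaces A's single forward scan with a flush-on-marker accumulator by a recursive segment decomposition: repeatedly peel off one component (the head line plus following non-marker lines) and recurse on the remaining lines.
import Mathlib
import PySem

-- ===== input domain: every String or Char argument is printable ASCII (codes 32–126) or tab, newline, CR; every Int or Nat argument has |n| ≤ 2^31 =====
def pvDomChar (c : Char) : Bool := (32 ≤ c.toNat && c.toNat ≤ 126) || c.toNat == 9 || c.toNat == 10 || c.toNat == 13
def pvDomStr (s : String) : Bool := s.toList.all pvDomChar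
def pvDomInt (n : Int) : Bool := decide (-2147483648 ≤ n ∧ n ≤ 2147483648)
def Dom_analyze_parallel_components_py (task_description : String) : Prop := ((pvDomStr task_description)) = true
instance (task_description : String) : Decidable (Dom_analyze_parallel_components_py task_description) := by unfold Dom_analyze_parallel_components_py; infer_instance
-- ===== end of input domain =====

-- B replaces A's forward flush-on-marker accumulator by a recursive segment
-- decomposition: peel off one component (head line plus following non-marker
-- lines), recurse on the rest (objective: alternative decomposition, not faster).

-- ===== PORT A =====
-- A's marker test, inline in the loop: any(marker in line.lower() for marker in [...])
def pvMarker (line : String) : Bool :=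
  (["independent", "parallel", "concurrent"] : List String).any
    (fun m => PySem.Str.isIn m (PySem.Str.lower line))

-- A's loop body: flush current component on a marker line, then append the line
def pvStepA (st : List String × List String) (line : String) : List String × List String :=
  let st := if pvMarker line && !st.2.isEmpty
            then (st.1 ++ [PySem.Str.join "\n" st.2], ([] : List String))
            else st
  (st.1, st.2 ++ [line])

-- split('\n'): sep ≠ "" so split? is always some; .getD [] only makes it total
def pvLines (t : String) : List String := (PySem.Str.split? t "\n").getD []

def analyze_parallel_components_py (task_description : String) : List String :=
  let st := (pvLines task_description).foldl pvStepA ([], [])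
  let components := if st.2.isEmpty then st.1 else st.1 ++ [PySem.Str.join "\n" st.2]
  if components.isEmpty then [task_description] else components

-- ===== PORT B =====
-- B's _is_marker: lowercase once, then any substring test
def pvIsMarker (line : String) : Bool :=
  let low := PySem.Str.lower line
  (["independent", "parallel", "concurrent"] : List String).any (fun m => PySem.Str.isIn m low)

-- B's inner while loop: move non-marker lines from the front of rest into body
def pvSplitFirst (body : List String) (rest : List String) : List String × List String :=
  match rest with
  | [] => (body, [])
  | r :: rs => if pvIsMarker r then (body, r :: rs) else pvSplitFirst (body ++ [r]) rs

-- B's _components: peel off one component, recurse on the remaining lines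
-- (fuel = number of lines, a totality guard: pvSplitFirst only shortens the list)
def pvComponentsF : Nat → List String → List String
  | _, [] => []
  | 0, _ :: _ => []
  | fuel + 1, l :: rest =>
    let p := pvSplitFirst [l] rest
    PySem.Str.join "\n" p.1 :: pvComponentsF fuel p.2

def pvComponents (lines : List String) : List String :=
  pvComponentsF lines.length lines

def analyze_parallel_components_py_alt (task_description : String) : List String :=
  let components := pvComponents ((PySem.Str.split? task_description "\n").getD [])
  if components.isEmpty then [task_description] else components

-- ===== PRECONDITION & SPEC =====
def Spec_analyze_parallel_components_py (task_description : String) (out : List String) : Prop := out = analyze_parallel_components_py_alt task_description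
instance (task_description : String) (out : List String) : Decidable (Spec_analyze_parallel_components_py task_description out) := by unfold Spec_analyze_parallel_components_py; infer_instance

-- ===== CLAIM (what is proved, stated in full; the proofs are below) =====
def Claim_equal_analyze_parallel_components_py : Prop := ∀ (task_description : String), Dom_analyze_parallel_components_py task_description → Spec_analyze_parallel_components_py task_description (analyze_parallel_components_py task_description)

-- ===== LEMMAS AND PROOFS =====

-- the two marker tests are the same function
lemma pvIsMarker_eq_pvMarker (l : String) : pvIsMarker l = pvMarker l := rfl

-- common shape: pvGroups rest = (groups each starting at a marker line, lines of rest before the first marker)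
def pvGroups : List String → List (List String) × List String
  | [] => ([], [])
  | l :: rest =>
    let g := pvGroups rest
    if pvMarker l then ((l :: g.2) :: g.1, []) else (g.1, l :: g.2)

lemma pvFinishFoldA (rest : List String) :
    ∀ (comps cur : List String), cur ≠ [] →
      (let st := rest.foldl pvStepA (comps, cur);
       if st.2.isEmpty then st.1 else st.1 ++ [PySem.Str.join "\n" st.2]) =
      comps ++ ((cur ++ (pvGroups rest).2) :: (pvGroups rest).1).map (PySem.Str.join "\n") := by
  induction rest with
  | nil => intro comps cur hcur; simp [pvGroups, hcur]
  | cons l rest ih =>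
    intro comps cur hcur
    simp only [List.foldl_cons, pvStepA, pvGroups]
    by_cases h : pvMarker l = true
    · have : (pvMarker l && !cur.isEmpty) = true := by simp [h, hcur]
      simp only [this, if_pos, List.nil_append]
      rw [ih (comps ++ [PySem.Str.join "\n" cur]) [l] (by simp)]
      simp [h, List.append_assoc]
    · have hb : pvMarker l = false := by simpa using h
      have : (pvMarker l && !cur.isEmpty) = false := by simp [hb]
      simp only [this, Bool.false_eq_true, if_neg, not_false_iff]
      rw [ih comps (cur ++ [l]) (by simp)]
      simp [hb, List.append_assoc]

-- B's inner loop in closed form: takeWhile / dropWhile on the non-marker predicate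
lemma pvSplitFirst_eq (rest : List String) :
    ∀ body, pvSplitFirst body rest =
      (body ++ rest.takeWhile (fun s => !pvMarker s), rest.dropWhile (fun s => !pvMarker s)) := by
  induction rest with
  | nil => intro body; simp [pvSplitFirst]
  | cons r rs ih =>
    intro body
    by_cases h : pvMarker r = true
    · simp [pvSplitFirst, pvIsMarker_eq_pvMarker, h, List.dropWhile_cons]
    · have hb : pvMarker r = false := by simpa using h
      simp [pvSplitFirst, pvIsMarker_eq_pvMarker, hb, List.dropWhile_cons, ih]

-- pvGroups in closed form via takeWhile / dropWhile
lemma pvGroups_eq (rest : List String) :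
    pvGroups rest = ((pvGroups (rest.dropWhile (fun s => !pvMarker s))).1,
                     rest.takeWhile (fun s => !pvMarker s)) := by
  induction rest with
  | nil => simp [pvGroups]
  | cons r rs ih =>
    by_cases h : pvMarker r = true
    · simp [pvGroups, h, List.dropWhile_cons]
    · have hb : pvMarker r = false := by simpa using h
      simp [pvGroups, hb, List.dropWhile_cons, ih]

lemma dropWhile_head_false {p : String → Bool} {rest : List String} {m : String} {rs : List String}
    (h : rest.dropWhile p = m :: rs) : p m = false := by
  induction rest with
  | nil => simp [List.dropWhile] at h
  | cons r rs' ih =>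
    by_cases hp : p r = true
    · rw [List.dropWhile_cons, if_pos hp] at h; exact ih h
    · rw [List.dropWhile_cons, if_neg hp] at h
      cases h; simpa using hp

-- main bridge: B's recursion computes exactly the joined pvGroups decomposition
lemma pvComponentsF_eq (n : ℕ) : ∀ (rest : List String), rest.length ≤ n → ∀ l,
    pvComponentsF (n + 1) (l :: rest) =
      ((l :: (pvGroups rest).2) :: (pvGroups rest).1).map (PySem.Str.join "\n") := by
  induction n with
  | zero =>
    intro rest hn l
    have : rest = [] := by cases rest <;> simp_all
    subst this
    simp [pvComponentsF, pvSplitFirst, pvGroups]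
  | succ n ih =>
    intro rest hn l
    rw [pvComponentsF]
    rw [pvSplitFirst_eq]
    rw [pvGroups_eq rest]
    cases hd : rest.dropWhile (fun s => !pvMarker s) with
    | nil => simp [pvComponentsF, pvGroups]
    | cons m rs =>
      have hm : pvMarker m = true := by
        have := dropWhile_head_false hd; simpa using this
      have hlen : rs.length ≤ n := by
        have h1 := List.length_dropWhile_le (fun s => !pvMarker s) rest
        rw [hd] at h1
        simp only [List.length_cons] at h1
        omega
      simp only []
      rw [ih rs hlen m]
      simp [pvGroups, hm]

lemma pvComponents_eq (rest : List String) (l : String) :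
    pvComponents (l :: rest) =
      ((l :: (pvGroups rest).2) :: (pvGroups rest).1).map (PySem.Str.join "\n") := by
  show pvComponentsF (rest.length + 1) (l :: rest) = _
  exact pvComponentsF_eq rest.length rest le_rfl l

-- ===== VERDICT (by name: the statement is the Claim_ definition above) =====
theorem analyze_parallel_components_py_spec : Claim_equal_analyze_parallel_components_py := by
  intro t _
  show analyze_parallel_components_py t = analyze_parallel_components_py_alt t
  unfold analyze_parallel_components_py analyze_parallel_components_py_alt
  cases hl : pvLines t with
  | nil =>
    have : (PySem.Str.split? t "\n").getD [] = [] := hl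
    simp [this, pvComponents, pvComponentsF]
  | cons l0 rest =>
    have hB : (PySem.Str.split? t "\n").getD [] = l0 :: rest := hl
    simp only [hB]
    have hfirst : pvStepA ([], []) l0 = (([] : List String), [l0]) := by
      simp [pvStepA]
    rw [List.foldl_cons, hfirst]
    have hA := pvFinishFoldA rest [] [l0] (by simp)
    simp only [List.nil_append] at hA
    rw [hA, pvComponents_eq rest l0]
    simp
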